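-- pv_equiv track=rewrite | github.com/Tej780/Algorithms_And_Data_Structures | Heap-HeapSort.py | Sink
-- ===== SOURCE A (Python) =====
-- def Swap(tree,node1Index,node2Index):
--     tree[node1Index] = tree[node1Index] + tree[node2Index]
--     tree[node2Index] = tree[node1Index] - tree[node2Index]
--     tree[node1Index] = tree[node1Index] - tree[node2Index]
--     return tree
--
-- def Sink(tree,k):
--     length = len(tree)
--     while 2*k <= length:
--         smallest = 2*k
--         if smallest < length and tree[2*k-1] > tree[2*k]:
--             smallest = 2*k+1
--         if tree[k-1] < tree[smallest-1]:
--             break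
--         tree = Swap(tree,k-1,smallest-1)
--         k = smallest
--     return tree
-- ===== SOURCE B (Python) =====
-- def Sink(tree, k):
--     # recursive sift-down; tuple swap (exact for ints); child picked as the min child
--     n = len(tree)
--     l, r = 2 * k, 2 * k + 1
--     if n < l:
--         return tree
--     c = r if r <= n and tree[r - 1] < tree[l - 1] else l
--     if tree[k - 1] < tree[c - 1]:
--         return tree
--     tree[k - 1], tree[c - 1] = tree[c - 1], tree[k - 1]
--     return Sink(tree, c)
-- ===== Notes on version B (the rewrite author's own statement) =====
-- stated objective: simpler
-- what changed: Iterative while-loop with an arithmetic add/subtract swap replaced by a direct recursive sift-down that picks the smaller child and swaps by tuple assignment (exact for ints).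
-- outside the precondition, e.g. on Sink([3, 5], 0): A returns [3, 5], B returns [3, 5]
import Mathlib
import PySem

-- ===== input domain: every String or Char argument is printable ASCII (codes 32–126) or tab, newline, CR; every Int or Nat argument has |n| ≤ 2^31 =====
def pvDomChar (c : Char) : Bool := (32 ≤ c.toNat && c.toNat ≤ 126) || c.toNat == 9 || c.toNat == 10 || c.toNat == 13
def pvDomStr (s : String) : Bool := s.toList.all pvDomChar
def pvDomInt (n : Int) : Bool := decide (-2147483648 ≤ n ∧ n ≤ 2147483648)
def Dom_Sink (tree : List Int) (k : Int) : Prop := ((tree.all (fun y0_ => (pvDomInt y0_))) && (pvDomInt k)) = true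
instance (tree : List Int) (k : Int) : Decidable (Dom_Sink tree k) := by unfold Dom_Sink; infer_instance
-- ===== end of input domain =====

-- B replaces A's iterative loop + arithmetic add/subtract swap by a recursive sift-down with a
-- tuple swap and min-child selection (objective: simpler). Return-value equivalence only: both
-- Pythons mutate the input list in place.

-- ===== PORT A =====
-- Python's arithmetic three-assignment swap, verbatim.
def SwapA (tree : List Int) (i j : Int) : List Int :=
  let t1 := PySem.List.pySetD tree i (PySem.List.pyGetD tree i 0 + PySem.List.pyGetD tree j 0)
  let t2 := PySem.List.pySetD t1 j (PySem.List.pyGetD t1 i 0 - PySem.List.pyGetD t1 j 0)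
  PySem.List.pySetD t2 i (PySem.List.pyGetD t2 i 0 - PySem.List.pyGetD t2 j 0)

-- the while loop, fuel-bounded for totality (tree.length + 1 fuel is enough under Pre_: k at
-- least doubles each iteration)
def SinkLoop : Nat → List Int → Int → Int → List Int
  | 0, tree, _, _ => tree
  | fuel + 1, tree, k, length =>
    if 2 * k ≤ length then
      let smallest := 2 * k
      let smallest :=
        if smallest < length ∧ PySem.List.pyGetD tree (2 * k - 1) 0 > PySem.List.pyGetD tree (2 * k) 0
        then 2 * k + 1 else smallest
      if PySem.List.pyGetD tree (k - 1) 0 < PySem.List.pyGetD tree (smallest - 1) 0 then tree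
      else SinkLoop fuel (SwapA tree (k - 1) (smallest - 1)) smallest length
    else tree

def Sink (tree : List Int) (k : Int) : List Int :=
  SinkLoop (tree.length + 1) tree k (tree.length : Int)

-- ===== PORT B =====
-- tuple swap: tree[i], tree[j] = tree[j], tree[i]
def swapB (tree : List Int) (i j : Int) : List Int :=
  let a := PySem.List.pyGetD tree i 0
  let b := PySem.List.pyGetD tree j 0
  PySem.List.pySetD (PySem.List.pySetD tree i b) j a

-- recursive sift-down, fuel-bounded for totality
def SinkRec : Nat → List Int → Int → List Int
  | 0, tree, _ => tree
  | fuel + 1, tree, k =>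
    let n : Int := tree.length
    let l := 2 * k
    let r := 2 * k + 1
    if n < l then tree
    else
      let c := if r ≤ n ∧ PySem.List.pyGetD tree (r - 1) 0 < PySem.List.pyGetD tree (l - 1) 0 then r else l
      if PySem.List.pyGetD tree (k - 1) 0 < PySem.List.pyGetD tree (c - 1) 0 then tree
      else SinkRec fuel (swapB tree (k - 1) (c - 1)) c

def Sink_alt (tree : List Int) (k : Int) : List Int :=
  SinkRec (tree.length + 1) tree k

-- ===== PRECONDITION & SPEC =====
-- Pre_ excludes k ≤ 0, on which A diverges (e.g. Sink([5], 0) loops forever) or returns a value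
-- produced by accidental negative-index wraparound.
def Pre_Sink (tree : List Int) (k : Int) : Prop := 1 ≤ k
instance (tree : List Int) (k : Int) : Decidable (Pre_Sink tree k) := by unfold Pre_Sink; infer_instance

def pvWitness_Sink : List Int × Int := ([5, 3, 8, 4, 1], 1)

def Spec_Sink (tree : List Int) (k : Int) (out : List Int) : Prop := out = Sink_alt tree k
instance (tree : List Int) (k : Int) (out : List Int) : Decidable (Spec_Sink tree k out) := by unfold Spec_Sink; infer_instance

-- ===== CLAIM (what is proved, stated in full; the proofs are below) =====
def Claim_equal_Sink : Prop := ∀ (tree : List Int) (k : Int), Dom_Sink tree k → Pre_Sink tree k → Spec_Sink tree k (Sink tree k)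

-- ===== LEMMAS AND PROOFS =====

lemma getD_set_ne (t : List Int) (I J : Nat) (x : Int) (hj : J < t.length) (hij : I ≠ J) :
    (t.set I x).getD J 0 = t.getD J 0 := by
  rw [List.getD_eq_getElem _ _ (by simpa using hj), List.getD_eq_getElem _ _ hj,
    List.getElem_set_ne (by omega)]

lemma getD_set_self (t : List Int) (I : Nat) (x : Int) (hi : I < t.length) :
    (t.set I x).getD I 0 = x := by
  rw [List.getD_eq_getElem _ _ (by simpa using hi), List.getElem_set_self]


lemma length_swapB (t : List Int) (i j : Int) : (swapB t i j).length = t.length := by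
  simp [swapB, PySem.List.length_pySetD]

lemma swap_eq (t : List Int) (i j : Int) (hi0 : 0 ≤ i) (hi : i < t.length)
    (hj0 : 0 ≤ j) (hj : j < t.length) (hij : i ≠ j) :
    SwapA t i j = swapB t i j := by
  obtain ⟨I, rfl⟩ : ∃ I : Nat, (I : Int) = i := ⟨i.toNat, by omega⟩
  obtain ⟨J, rfl⟩ : ∃ J : Nat, (J : Int) = j := ⟨j.toNat, by omega⟩
  have hI : I < t.length := by exact_mod_cast hi
  have hJ : J < t.length := by exact_mod_cast hj
  have hIJ : I ≠ J := by omega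
  simp only [SwapA, swapB, PySem.List.pySetD_natCast, PySem.List.pyGetD_natCast]
  have e1 : (t.set I (t.getD I 0 + t.getD J 0)).getD I 0 = t.getD I 0 + t.getD J 0 :=
    getD_set_self _ _ _ hI
  have e2 : (t.set I (t.getD I 0 + t.getD J 0)).getD J 0 = t.getD J 0 :=
    getD_set_ne _ _ _ _ hJ hIJ
  rw [e1, e2]
  have e3 : ((t.set I (t.getD I 0 + t.getD J 0)).set J (t.getD I 0 + t.getD J 0 - t.getD J 0)).getD I 0
      = t.getD I 0 + t.getD J 0 := by
    rw [getD_set_ne _ _ _ _ (by simpa using hI) (Ne.symm hIJ), e1]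
  have e4 : ((t.set I (t.getD I 0 + t.getD J 0)).set J (t.getD I 0 + t.getD J 0 - t.getD J 0)).getD J 0
      = t.getD I 0 + t.getD J 0 - t.getD J 0 :=
    getD_set_self _ _ _ (by simpa using hJ)
  rw [e3, e4]
  have h1 : t.getD I 0 + t.getD J 0 - t.getD J 0 = t.getD I 0 := by ring
  have h2 : t.getD I 0 + t.getD J 0 - t.getD I 0 = t.getD J 0 := by ring
  rw [h1, h2, List.set_comm _ _ (Ne.symm hIJ), List.set_set, List.set_comm _ _ hIJ]

lemma sinkLoop_eq (fuel : Nat) (t : List Int) (k : Int) (hk : 1 ≤ k) :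
    SinkLoop fuel t k (t.length : Int) = SinkRec fuel t k := by
  induction fuel generalizing t k with
  | zero => rfl
  | succ fuel ih =>
    simp only [SinkLoop, SinkRec]
    rw [show ((2 : Int) * k + 1 - 1) = 2 * k from by ring]
    by_cases hc : 2 * k ≤ (t.length : Int)
    · have hnc : ¬((t.length : Int) < 2 * k) := by omega
      rw [if_pos hc, if_neg hnc]
      by_cases hs : 2 * k < (t.length : Int) ∧
          PySem.List.pyGetD t (2 * k) 0 < PySem.List.pyGetD t (2 * k - 1) 0
      · have hsA : 2 * k < (t.length : Int) ∧
            PySem.List.pyGetD t (2 * k - 1) 0 > PySem.List.pyGetD t (2 * k) 0 := ⟨hs.1, hs.2⟩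
        have hsB : 2 * k + 1 ≤ (t.length : Int) ∧
            PySem.List.pyGetD t (2 * k) 0 < PySem.List.pyGetD t (2 * k - 1) 0 := ⟨by omega, hs.2⟩
        rw [if_pos hsA, if_pos hsB]
        by_cases hb : PySem.List.pyGetD t (k - 1) 0 < PySem.List.pyGetD t (2 * k + 1 - 1) 0
        · rw [if_pos hb, if_pos hb]
        · rw [if_neg hb, if_neg hb]
          rw [swap_eq t (k - 1) (2 * k + 1 - 1) (by omega) (by omega) (by omega)
            (by omega) (by omega)]
          have hlen : ((swapB t (k - 1) (2 * k + 1 - 1)).length : Int) = (t.length : Int) := by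
            rw [length_swapB]
          rw [← hlen]
          exact ih _ _ (by omega)
      · have hsA : ¬(2 * k < (t.length : Int) ∧
            PySem.List.pyGetD t (2 * k - 1) 0 > PySem.List.pyGetD t (2 * k) 0) :=
          fun h => hs ⟨h.1, h.2⟩
        have hsB : ¬(2 * k + 1 ≤ (t.length : Int) ∧
            PySem.List.pyGetD t (2 * k) 0 < PySem.List.pyGetD t (2 * k - 1) 0) :=
          fun h => hs ⟨by omega, h.2⟩
        rw [if_neg hsA, if_neg hsB]
        by_cases hb : PySem.List.pyGetD t (k - 1) 0 < PySem.List.pyGetD t (2 * k - 1) 0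
        · rw [if_pos hb, if_pos hb]
        · rw [if_neg hb, if_neg hb]
          rw [swap_eq t (k - 1) (2 * k - 1) (by omega) (by omega) (by omega)
            (by omega) (by omega)]
          have hlen : ((swapB t (k - 1) (2 * k - 1)).length : Int) = (t.length : Int) := by
            rw [length_swapB]
          rw [← hlen]
          exact ih _ _ (by omega)
    · have hc' : (t.length : Int) < 2 * k := by omega
      rw [if_neg hc, if_pos hc']

-- ===== VERDICT (by name: the statement is the Claim_ definition above) =====
theorem Sink_spec : Claim_equal_Sink := by
  intro tree k _ hk
  unfold Spec_Sink Sink Sink_alt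
  exact sinkLoop_eq _ tree k hk
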